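-- pv_equiv track=rewrite | github.com/mikhayluv/bonus_track | parsers/main.py | get_region_name
-- ===== SOURCE A (Python) =====
-- def get_region_name(region_test_check):
--     comma_counter = 0
--     probel_counter = 0
--     region = ''
--     for i in region_test_check:
--         if i == ',':
--             comma_counter += 1
--             probel_counter = 1
--             if comma_counter == 2:
--                 break
--         if comma_counter == 1:
--             if probel_counter == 1:
--                 probel_counter += 1
--                 continue
--             region += i
--     return region[1:]
-- ===== SOURCE B (Python) =====
-- def get_region_name(region_test_check):
--     i = region_test_check.find(',')
--     if i == -1:
--         return ''
--     j = region_test_check.find(',', i + 1)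
--     if j == -1:
--         j = len(region_test_check)
--     return region_test_check[i + 2:j]
-- ===== Notes on version B (the rewrite author's own statement) =====
-- stated objective: faster
-- what changed: Replaced the counter/flag-driven per-character Python loop that accumulates the region string with two str.find calls locating the first and second commas followed by a single slice (C-level scanning instead of a Python-level loop).
import Mathlib
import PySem

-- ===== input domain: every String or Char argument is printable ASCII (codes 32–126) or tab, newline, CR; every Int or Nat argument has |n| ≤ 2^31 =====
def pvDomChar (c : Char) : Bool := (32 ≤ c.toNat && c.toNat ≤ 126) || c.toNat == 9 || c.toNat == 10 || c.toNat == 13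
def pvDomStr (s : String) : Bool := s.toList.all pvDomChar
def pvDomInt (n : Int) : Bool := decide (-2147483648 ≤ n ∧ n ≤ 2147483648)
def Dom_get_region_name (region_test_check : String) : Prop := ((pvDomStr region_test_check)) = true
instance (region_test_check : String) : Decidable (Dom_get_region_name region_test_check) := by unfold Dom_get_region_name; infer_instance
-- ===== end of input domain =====

-- B replaces A's counter/flag per-character loop by two str.find calls and one slice; same O(n) but measured constant-factor faster (C-level scan).

-- ===== PORT A =====
-- the for-loop of A: state (comma_counter, probel_counter, region); 'break' returns region
def garLoop (cs : List Char) (comma_counter probel_counter : Nat) (region : List Char) : List Char :=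
  match cs with
  | [] => region
  | i :: rest =>
    let cc := if i = ',' then comma_counter + 1 else comma_counter
    let pc := if i = ',' then 1 else probel_counter
    if i = ',' ∧ cc = 2 then region
    else if cc = 1 then
      if pc = 1 then garLoop rest cc (pc + 1) region
      else garLoop rest cc pc (region ++ [i])
    else garLoop rest cc pc region

def get_region_name (region_test_check : String) : String :=
  String.ofList (PySem.List.slice (garLoop region_test_check.toList 0 0 []) (some 1) none)

-- ===== PORT B =====
def get_region_name_alt (region_test_check : String) : String :=
  let i := PySem.Str.find region_test_check ","
  if i = -1 then ""
  else
    let j := PySem.Str.findFrom region_test_check "," (i + 1) none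
    let j := if j = -1 then PySem.Str.len region_test_check else j
    PySem.Str.slice region_test_check (some (i + 2)) (some j)

-- ===== PRECONDITION & SPEC =====
def Spec_get_region_name (region_test_check : String) (out : String) : Prop := out = get_region_name_alt region_test_check
instance (region_test_check : String) (out : String) : Decidable (Spec_get_region_name region_test_check out) := by unfold Spec_get_region_name; infer_instance

-- ===== CLAIM (what is proved, stated in full; the proofs are below) =====
def Claim_equal_get_region_name : Prop := ∀ (region_test_check : String), Dom_get_region_name region_test_check → Spec_get_region_name region_test_check (get_region_name region_test_check)

-- ===== LEMMAS AND PROOFS =====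

-- A's loop after the first comma (cc = 1, pc = 2): appends chars up to the next comma
theorem garLoop_phase1 (cs : List Char) (r : List Char) :
    garLoop cs 1 2 r = r ++ cs.takeWhile (· ≠ ',') := by
  induction cs generalizing r with
  | nil => simp [garLoop]
  | cons c rest ih =>
    by_cases h : c = ','
    · simp [garLoop, h, List.takeWhile_cons]
    · simp [garLoop, h, List.takeWhile_cons, ih, List.append_assoc]

-- A's loop before any comma (cc = 0, pc = 0): skips chars up to the first comma
theorem garLoop_phase0 (cs : List Char) :
    garLoop cs 0 0 [] =
      if (',' ∈ cs) then ((cs.dropWhile (· ≠ ',')).tail).takeWhile (· ≠ ',') else [] := by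
  induction cs with
  | nil => simp [garLoop]
  | cons c rest ih =>
    by_cases h : c = ','
    · simp [garLoop, h, List.dropWhile_cons, garLoop_phase1]
    · simp [garLoop, h, ih, show ¬ ',' = c from fun hh => h hh.symm]

-- first-occurrence characterisation of PySem.Chars.find.go for a single-char needle
theorem find_go_single (cs : List Char) (k : Nat) :
    PySem.Chars.find.go [','] cs k =
      if (',' ∈ cs) then (k + (cs.takeWhile (· ≠ ',')).length : Int) else -1 := by
  induction cs generalizing k with
  | nil => simp [PySem.Chars.find.go]
  | cons c rest ih =>
    by_cases h : c = ','
    · simp [PySem.Chars.find.go, List.isPrefixOf, h, List.takeWhile_cons]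
    · have hne : ¬ ',' = c := fun hh => h hh.symm
      have hpre : List.isPrefixOf [','] (c :: rest) = false := by
        simp [List.isPrefixOf, hne]
      simp only [PySem.Chars.find.go, hpre, Bool.false_eq_true, if_false, ih]
      by_cases hm : ',' ∈ rest
      · simp only [hm, if_true, List.mem_cons, or_true, List.takeWhile_cons, h, hne,
          decide_eq_true_eq, ne_eq, not_false_iff, decide_true, if_true, List.length_cons]
        push_cast
        ring
      · simp [hm, h, hne]

theorem find_single (cs : List Char) :
    PySem.Chars.find cs [','] =
      if (',' ∈ cs) then ((cs.takeWhile (· ≠ ',')).length : Int) else -1 := by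
  simpa using find_go_single cs 0

-- decomposition at the first comma
theorem decomp_at_comma (cs : List Char) (h : ',' ∈ cs) :
    cs = cs.takeWhile (· ≠ ',') ++ ',' :: (cs.dropWhile (· ≠ ',')).tail := by
  induction cs with
  | nil => cases h
  | cons c rest ih =>
    by_cases hc : c = ','
    · simp [hc]
    · have h' : ',' ∈ rest := by
        rcases List.mem_cons.mp h with h1 | h1
        · exact absurd h1.symm hc
        · exact h1
      simp only [List.takeWhile_cons, List.dropWhile_cons, hc, ne_eq,
        not_false_iff, decide_true, if_true]
      simpa [hc] using ih h'

-- take of length of takeWhile recovers takeWhile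
theorem take_len_takeWhile (p : Char → Bool) (l : List Char) :
    l.take (l.takeWhile p).length = l.takeWhile p := by
  induction l with
  | nil => simp
  | cons c rest ih =>
    by_cases h : p c
    · simp [h, ih]
    · simp [h]

-- tail/takeWhile slice arithmetic: take (|takeWhile u| - 1) of u.tail is (takeWhile u).tail
theorem take_tail_takeWhile (u : List Char) :
    (u.drop 1).take ((u.takeWhile (· ≠ ',')).length - 1) = (u.takeWhile (· ≠ ',')).drop 1 := by
  rcases u with _ | ⟨c, rest⟩
  · simp
  · by_cases h : c = ','
    · simp [h]
    · simp [h, take_len_takeWhile]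

-- main pointwise equality
theorem main_eq (s : String) : get_region_name s = get_region_name_alt s := by
  apply String.toList_inj.mp
  by_cases h1 : ',' ∈ s.toList
  · -- first comma exists, at index i = |t| where t = takeWhile
    set t := s.toList.takeWhile (· ≠ ',') with ht
    set u := (s.toList.dropWhile (· ≠ ',')).tail with hu
    have hdec : s.toList = t ++ ',' :: u := decomp_at_comma s.toList h1
    have hfind : PySem.Chars.find s.toList [','] = (t.length : Int) := by
      rw [find_single]; simp [h1, ht]
    have hlen : t.length + 1 ≤ s.toList.length := by
      rw [hdec]; simp
    have hdrop : s.toList.drop (t.length + 1) = u := by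
      rw [hdec]; simp [List.drop_append]
    have hfindFrom :
        PySem.Chars.findFrom s.toList [','] ((t.length : Int) + 1) none =
          if PySem.Chars.find u [','] = -1 then -1
          else ((t.length : Int) + 1) + PySem.Chars.find u [','] := by
      have := PySem.Chars.findFrom_natCast s.toList [','] (t.length + 1) hlen
      rw [hdrop] at this
      simpa using this
    have hcl : (",".toList) = [','] := by simp
    simp only [get_region_name, get_region_name_alt, PySem.Str.find, PySem.Str.findFrom,
      PySem.Str.len, PySem.Str.slice, PySem.Chars.slice, hcl, hfind]
    rw [garLoop_phase0]
    simp only [h1, if_true, ← ht, ← hu]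
    have hne : (t.length : Int) ≠ -1 := by omega
    rw [if_neg hne, hfindFrom, find_single u]
    by_cases h2 : ',' ∈ u
    · -- second comma exists at t.length + 1 + |takeWhile u|
      set tu := u.takeWhile (· ≠ ',') with htu
      have hne3 : (tu.length : Int) ≠ -1 := by omega
      have hne2 : (t.length : Int) + 1 + (tu.length : Int) ≠ -1 := by omega
      simp only [h2, if_true, ← htu, if_neg hne3, if_neg hne2]
      rw [PySem.List.slice_from _ (by norm_num : (0:Int) ≤ 1),
          PySem.List.slice_toNat _ (by omega) (by omega)]
      have hdrop2 : s.toList.drop (((t.length : Int) + 2).toNat) = u.drop 1 := by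
        rw [show ((t.length : Int) + 2).toNat = t.length + (1 + 1) by omega, ← List.drop_drop,
          hdec]
        simp [List.drop_append]
      rw [hdrop2]
      have hb : ((t.length : Int) + 1 + (tu.length : Int)).toNat - ((t.length : Int) + 2).toNat
          = tu.length - 1 := by omega
      rw [hb, show Int.toNat 1 = 1 from rfl, take_tail_takeWhile u]
    · -- no second comma: j = len s, slice to the end
      simp only [h2, if_false, if_true, reduceIte]
      rw [PySem.List.slice_from _ (by norm_num : (0:Int) ≤ 1),
          PySem.List.slice_toNat _ (by omega) (by omega)]
      have hdrop2 : s.toList.drop (((t.length : Int) + 2).toNat) = u.drop 1 := by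
        rw [show ((t.length : Int) + 2).toNat = t.length + (1 + 1) by omega, ← List.drop_drop,
          hdec]
        simp [List.drop_append]
      rw [hdrop2]
      have hlen2 : s.toList.length = t.length + 1 + u.length := by rw [hdec]; simp; omega
      have hb : ((s.toList.length : Int)).toNat - ((t.length : Int) + 2).toNat = u.length - 1 := by
        omega
      rw [hb, show Int.toNat 1 = 1 from rfl]
      have hself : u.takeWhile (· ≠ ',') = u := by
        rw [List.takeWhile_eq_self_iff]
        intro c hc
        simp only [ne_eq, decide_eq_true_eq]
        intro hcc
        exact h2 (hcc ▸ hc)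
      rw [hself, List.take_of_length_le (by simp)]
  · -- no comma at all: both empty
    have : PySem.Chars.find s.toList [','] = -1 := by rw [find_single]; simp [h1]
    have hcl : (",".toList) = [','] := by simp
    simp [get_region_name, get_region_name_alt, PySem.Str.find, hcl, this, garLoop_phase0, h1,
      PySem.List.slice]

-- ===== VERDICT (by name: the statement is the Claim_ definition above) =====
theorem get_region_name_spec : Claim_equal_get_region_name := by
  intro s _
  unfold Spec_get_region_name
  exact main_eq s
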